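-- pv_equiv track=rewrite | github.com/VUTP-University/Algorithms-Data-Structures-MiniProjects | miniproject-2-protocol-QV-7-team-sigma/protocol_qv7.py | action_log
-- ===== SOURCE A (Python) =====
-- def action_log(codes: list) -> list:
--     """
--     Builds an action log using a LIFO stack where each code generates
--     'decode_<code>' and 'validate_<code>' actions. The last two actions
--     represent corrupted operations and must be removed (undo).
--
--     Arguments:
--         codes (list): List of sequence codes.
--
--     Returns:
--         list: Stack after removing the last two invalid operations.
--
--     Example Input:
--         [7, 12, 18]
--     Example Generated Actions:
--         ['decode_7', 'validate_7', 'decode_12', 'validate_12', 'decode_18', 'validate_18']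
--         after removing 2:
--         ['decode_7', 'validate_7', 'decode_12', 'validate_12']
--     """
--     # TODO: Use Python list as stack
--     stack = []
--
--     for code in codes:
--         stack.append(f"decode_{code}")
--         stack.append(f"validate_{code}")
--
--     if len(stack) >= 2:
--         stack.pop()
--         stack.pop()
--
--     return stack
-- ===== SOURCE B (Python) =====
-- def action_log(codes: list) -> list:
--     # Emit decode_/validate_ directly for all codes except the last; no stack, no pop.
--     return [f"{act}_{code}" for code in codes[:-1] for act in ("decode", "validate")]
-- ===== Notes on version B (the rewrite author's own statement) =====
-- stated objective: simpler
-- what changed: B drops the stack-and-undo: it slices off the last code with codes[:-1] and emits decode_/validate_ for each kept code in a flat comprehension, with no pop and no length guard.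
import Mathlib
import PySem

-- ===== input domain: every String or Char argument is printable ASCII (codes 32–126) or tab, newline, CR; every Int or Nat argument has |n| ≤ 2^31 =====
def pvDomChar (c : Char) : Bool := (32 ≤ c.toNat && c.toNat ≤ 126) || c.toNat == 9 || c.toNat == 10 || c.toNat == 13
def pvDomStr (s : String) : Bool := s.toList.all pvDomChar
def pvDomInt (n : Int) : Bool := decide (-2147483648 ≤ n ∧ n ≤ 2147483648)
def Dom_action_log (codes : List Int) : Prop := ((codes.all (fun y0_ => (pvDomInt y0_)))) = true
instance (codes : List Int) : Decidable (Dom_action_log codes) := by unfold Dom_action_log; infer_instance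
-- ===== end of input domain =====

-- B replaces A's build-then-pop-twice stack by emitting the two actions directly for codes[:-1] (simpler; return value only).

-- ===== PORT A =====
def action_log (codes : List Int) : List String :=
  let stack : List String :=
    codes.foldl (fun stack code =>
      (stack ++ ["decode_" ++ PySem.Int.toStr code]) ++ ["validate_" ++ PySem.Int.toStr code]) []
  if 2 ≤ stack.length then stack.dropLast.dropLast else stack

-- ===== PORT B =====
def action_log_alt (codes : List Int) : List String :=
  (PySem.List.slice codes none (some (-1))).flatMap
    (fun code => ["decode", "validate"].map (fun act => (act ++ "_") ++ PySem.Int.toStr code))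

-- ===== PRECONDITION & SPEC =====
def Spec_action_log (codes : List Int) (out : List String) : Prop := out = action_log_alt codes
instance (codes : List Int) (out : List String) : Decidable (Spec_action_log codes out) := by unfold Spec_action_log; infer_instance

-- ===== CLAIM (what is proved, stated in full; the proofs are below) =====
def Claim_equal_action_log : Prop := ∀ (codes : List Int), Dom_action_log codes → Spec_action_log codes (action_log codes)

-- ===== LEMMAS AND PROOFS =====

def pvPair (code : Int) : List String :=
  ["decode_" ++ PySem.Int.toStr code, "validate_" ++ PySem.Int.toStr code]

theorem pvStack_eq (codes : List Int) :
    codes.foldl (fun stack code =>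
      (stack ++ ["decode_" ++ PySem.Int.toStr code]) ++ ["validate_" ++ PySem.Int.toStr code]) []
    = codes.flatMap pvPair := by
  have h := PySem.List.foldl_append_eq_flatMap (l := codes) (acc := ([] : List String)) (g := pvPair)
  simpa [pvPair, List.append_assoc] using h

theorem pvMain (codes : List Int) : action_log codes = action_log_alt codes := by
  unfold action_log action_log_alt
  rw [pvStack_eq, PySem.List.slice_to_neg_one]
  have hB : ∀ cs : List Int, cs.flatMap
      (fun code => ["decode", "validate"].map (fun act => (act ++ "_") ++ PySem.Int.toStr code))
      = cs.flatMap pvPair := by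
    intro cs
    have hf : (fun (code : Int) => ["decode", "validate"].map (fun act => (act ++ "_") ++ PySem.Int.toStr code)) = pvPair := by
      funext code; rfl
    rw [hf]
  rw [hB]
  cases hc : codes.reverse with
  | nil =>
    have : codes = [] := by simpa using congrArg List.reverse hc
    subst this; simp
  | cons l t =>
    have hcodes : codes = t.reverse ++ [l] := by
      have := congrArg List.reverse hc; simpa using this
    subst hcodes
    simp [List.flatMap_append, pvPair]

-- ===== VERDICT (by name: the statement is the Claim_ definition above) =====
theorem action_log_spec : Claim_equal_action_log := by
  intro codes _
  exact pvMain codes
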